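-- pv_equiv track=rewrite | github.com/Maneeshamuthyalapalli/codeforces | Special Numbers.py | find_kth_special_number
-- ===== SOURCE A (Python) =====
-- def find_kth_special_number(n, k):
--     MOD = 10**9 + 7
--     result = 0
--     power = 1
--     while k > 0:
--         if k % 2 == 1:
--             result = (result + power) % MOD
--         power = (power * n) % MOD
--         k //= 2
--     return result
-- ===== SOURCE B (Python) =====
-- def find_kth_special_number(n, k):
--     MOD = 10**9 + 7
--     bits = []
--     while k > 0:
--         bits.append(k % 2)
--         k //= 2
--     result = 0
--     for b in reversed(bits):
--         result = (result * n + b) % MOD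
--     return result
-- ===== Notes on version B (the rewrite author's own statement) =====
-- stated objective: alternative
-- what changed: Replaces the LSB-first loop that maintains a running power of n with a two-phase Horner evaluation: collect k's bits, then fold them MSB-first with result = (result*n + bit) % MOD, eliminating the power accumulator.
import Mathlib
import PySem

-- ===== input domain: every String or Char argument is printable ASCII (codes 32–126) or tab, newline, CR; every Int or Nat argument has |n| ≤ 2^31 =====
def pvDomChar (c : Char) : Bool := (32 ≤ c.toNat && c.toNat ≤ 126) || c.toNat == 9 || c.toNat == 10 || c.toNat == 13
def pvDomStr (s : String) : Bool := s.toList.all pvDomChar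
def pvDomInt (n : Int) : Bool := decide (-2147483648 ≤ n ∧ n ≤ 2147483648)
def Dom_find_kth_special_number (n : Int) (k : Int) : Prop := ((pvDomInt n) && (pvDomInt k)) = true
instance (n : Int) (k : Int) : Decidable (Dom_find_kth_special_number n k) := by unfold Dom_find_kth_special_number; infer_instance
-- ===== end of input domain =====

-- B replaces A's LSB-first loop with a power accumulator by a two-phase Horner
-- evaluation (collect the bits, then fold them MSB-first); same cost, different decomposition.

def pvMOD : Int := 1000000007

-- termination measure for the k > 0 loops: k // 2 shrinks toward 0
theorem pvHalf_lt (k : Int) (h : 0 < k) : (PySem.Int.floordiv k 2).toNat < k.toNat := by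
  rw [PySem.Int.floordiv_eq_ediv_of_pos (by omega)]
  omega

-- ===== PORT A =====
-- the while loop of A, state (k, result, power)
def pvLoopA (n k result power : Int) : Int :=
  if h : 0 < k then
    let result' := if PySem.Int.mod k 2 = 1 then PySem.Int.mod (result + power) pvMOD else result
    pvLoopA n (PySem.Int.floordiv k 2) result' (PySem.Int.mod (power * n) pvMOD)
  else
    result
termination_by k.toNat
decreasing_by exact pvHalf_lt k h

def find_kth_special_number (n : Int) (k : Int) : Int := pvLoopA n k 0 1

-- ===== PORT B =====
-- first while loop of B: bits.append(k % 2); k //= 2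
def pvCollectBits (k : Int) (acc : List Int) : List Int :=
  if h : 0 < k then pvCollectBits (PySem.Int.floordiv k 2) (acc ++ [PySem.Int.mod k 2]) else acc
termination_by k.toNat
decreasing_by exact pvHalf_lt k h

-- second loop of B: Horner fold over reversed(bits)
def find_kth_special_number_alt (n : Int) (k : Int) : Int :=
  (pvCollectBits k []).reverse.foldl (fun r b => PySem.Int.mod (r * n + b) pvMOD) 0

-- ===== PRECONDITION & SPEC =====
def Spec_find_kth_special_number (n : Int) (k : Int) (out : Int) : Prop := out = find_kth_special_number_alt n k
instance (n : Int) (k : Int) (out : Int) : Decidable (Spec_find_kth_special_number n k out) := by unfold Spec_find_kth_special_number; infer_instance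

-- ===== CLAIM (what is proved, stated in full; the proofs are below) =====
def Claim_equal_find_kth_special_number : Prop := ∀ (n : Int) (k : Int), Dom_find_kth_special_number n k → Spec_find_kth_special_number n k (find_kth_special_number n k)

-- ===== LEMMAS AND PROOFS =====

-- reference spec: Horner recurrence on the bits of k
def pvF (n k : Int) : Int :=
  if h : 0 < k then PySem.Int.mod (pvF n (PySem.Int.floordiv k 2) * n + PySem.Int.mod k 2) pvMOD else 0
termination_by k.toNat
decreasing_by exact pvHalf_lt k h

-- the LSB-first bit list of k
def pvBits (k : Int) : List Int :=
  if h : 0 < k then PySem.Int.mod k 2 :: pvBits (PySem.Int.floordiv k 2) else []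
termination_by k.toNat
decreasing_by exact pvHalf_lt k h

theorem pvCollectBits_eq (k : Int) : ∀ acc, pvCollectBits k acc = acc ++ pvBits k := by
  induction k using pvBits.induct with
  | case1 k h ih =>
      intro acc
      rw [pvCollectBits, pvBits, dif_pos h, dif_pos h, ih]
      simp
  | case2 k h =>
      intro acc
      rw [pvCollectBits, pvBits, dif_neg h, dif_neg h]
      simp

theorem pvAlt_eq_F (n k : Int) : find_kth_special_number_alt n k = pvF n k := by
  unfold find_kth_special_number_alt
  rw [pvCollectBits_eq, List.nil_append, List.foldl_reverse]
  induction k using pvBits.induct with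
  | case1 k h ih =>
      rw [pvBits, pvF, dif_pos h, dif_pos h, List.foldr_cons, ih]
  | case2 k h =>
      rw [pvBits, pvF, dif_neg h, dif_neg h, List.foldr_nil]

theorem pvF_nonneg_lt (n k : Int) : 0 ≤ pvF n k ∧ pvF n k < pvMOD := by
  rw [pvF]
  split
  · rw [PySem.Int.mod_eq_emod_of_pos (by norm_num [pvMOD])]
    constructor
    · exact Int.emod_nonneg _ (by norm_num [pvMOD])
    · exact Int.emod_lt_of_pos _ (by norm_num [pvMOD])
  · norm_num [pvMOD]

-- modular mixing: fold A's step into the Horner form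
theorem pvMix (M r p q x b : Int) :
    ((r + p * b) % M + (p * q) % M * x) % M = (r + p * ((x * q + b) % M)) % M := by
  have e1 : Int.ModEq M ((r + p * b) % M) (r + p * b) := Int.emod_emod_of_dvd _ dvd_rfl
  have e2 : Int.ModEq M ((p * q) % M) (p * q) := Int.emod_emod_of_dvd _ dvd_rfl
  have e3 : Int.ModEq M ((x * q + b) % M) (x * q + b) := Int.emod_emod_of_dvd _ dvd_rfl
  have h1 := e1.add (e2.mul (Int.ModEq.refl x))
  have h2 := (Int.ModEq.refl r).add ((Int.ModEq.refl p).mul e3)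
  have heq : ((r + p * b) + (p * q) * x) = (r + p * (x * q + b)) := by ring
  exact h1.trans (heq ▸ h2.symm)

theorem pvLoopA_eq (n : Int) : ∀ k r p, 0 ≤ r → r < pvMOD →
    pvLoopA n k r p = PySem.Int.mod (r + p * pvF n k) pvMOD := by
  intro k
  induction k using pvBits.induct with
  | case1 k h ih =>
      intro r p hr0 hr1
      have hM : (0:Int) < pvMOD := by norm_num [pvMOD]
      rw [pvLoopA, dif_pos h, pvF, dif_pos h]
      by_cases hb : PySem.Int.mod k 2 = 1
      · simp only [if_pos hb]
        rw [ih _ _ (by rw [PySem.Int.mod_eq_emod_of_pos hM]; exact Int.emod_nonneg _ (by omega))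
              (by rw [PySem.Int.mod_eq_emod_of_pos hM]; exact Int.emod_lt_of_pos _ hM), hb]
        simp only [PySem.Int.mod_eq_emod_of_pos hM]
        have := pvMix pvMOD r p n (pvF n (PySem.Int.floordiv k 2)) 1
        rw [mul_one] at this
        exact this
      · have hb0 : 0 ≤ PySem.Int.mod k 2 := by
          rw [PySem.Int.mod_eq_emod_of_pos (by norm_num)]; exact Int.emod_nonneg _ (by norm_num)
        have hb1 : PySem.Int.mod k 2 < 2 := by
          rw [PySem.Int.mod_eq_emod_of_pos (by norm_num)]; exact Int.emod_lt_of_pos _ (by norm_num)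
        have hb' : PySem.Int.mod k 2 = 0 := by omega
        simp only [if_neg hb]
        rw [ih _ _ hr0 hr1, hb']
        simp only [PySem.Int.mod_eq_emod_of_pos hM]
        have := pvMix pvMOD r p n (pvF n (PySem.Int.floordiv k 2)) 0
        rw [mul_zero, add_zero, Int.emod_eq_of_lt hr0 hr1] at this
        exact this
  | case2 k h =>
      intro r p hr0 hr1
      rw [pvLoopA, dif_neg h, pvF, dif_neg h, mul_zero, add_zero,
          PySem.Int.mod_eq_emod_of_pos (by norm_num [pvMOD]), Int.emod_eq_of_lt hr0 hr1]

-- ===== VERDICT (by name: the statement is the Claim_ definition above) =====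
theorem find_kth_special_number_spec : Claim_equal_find_kth_special_number := by
  intro n k _
  show find_kth_special_number n k = find_kth_special_number_alt n k
  rw [find_kth_special_number, pvAlt_eq_F,
      pvLoopA_eq n k 0 1 le_rfl (by norm_num [pvMOD]), zero_add, one_mul,
      PySem.Int.mod_eq_emod_of_pos (by norm_num [pvMOD]),
      Int.emod_eq_of_lt (pvF_nonneg_lt n k).1 (pvF_nonneg_lt n k).2]
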